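-- pv_equiv track=rewrite | github.com/novem-code/novem-python | novem/cli/gql.py | _build_comment_fragment
-- ===== SOURCE A (Python) =====
-- _COMMENT_FIELDS = """
--     comment_id
--     slug
--     message
--     depth
--     deleted
--     edited
--     num_replies
--     likes
--     dislikes
--     my_reaction
--     created
--     updated
--     creator { username }
--     mentions { nonce user { username } }
-- """
--
-- def _build_comment_fragment(depth: int = 4) -> str:
--     """Build a nested comment/replies fragment to the given depth."""
--     fragment = _COMMENT_FIELDS
--     for _ in range(depth):
--         fragment = f"""
--     {_COMMENT_FIELDS}
--     replies {{{fragment}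
--     }}"""
--     return fragment
-- ===== SOURCE B (Python) =====
-- _COMMENT_FIELDS = """
--     comment_id
--     slug
--     message
--     depth
--     deleted
--     edited
--     num_replies
--     likes
--     dislikes
--     my_reaction
--     created
--     updated
--     creator { username }
--     mentions { nonce user { username } }
-- """
--
--
-- def _build_comment_fragment(depth: int = 4) -> str:
--     """Closed form: each wrap adds a fixed prefix and suffix, so repeat them."""
--     prefix = "\n    " + _COMMENT_FIELDS + "\n    replies {"
--     suffix = "\n    }"
--     return prefix * depth + _COMMENT_FIELDS + suffix * depth
-- ===== Notes on version B (the rewrite author's own statement) =====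
-- stated objective: simpler
-- what changed: Replaces the iterative re-wrapping loop with a closed-form string: the fixed prefix repeated depth times, the fields, then the fixed suffix repeated depth times.
import Mathlib
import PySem

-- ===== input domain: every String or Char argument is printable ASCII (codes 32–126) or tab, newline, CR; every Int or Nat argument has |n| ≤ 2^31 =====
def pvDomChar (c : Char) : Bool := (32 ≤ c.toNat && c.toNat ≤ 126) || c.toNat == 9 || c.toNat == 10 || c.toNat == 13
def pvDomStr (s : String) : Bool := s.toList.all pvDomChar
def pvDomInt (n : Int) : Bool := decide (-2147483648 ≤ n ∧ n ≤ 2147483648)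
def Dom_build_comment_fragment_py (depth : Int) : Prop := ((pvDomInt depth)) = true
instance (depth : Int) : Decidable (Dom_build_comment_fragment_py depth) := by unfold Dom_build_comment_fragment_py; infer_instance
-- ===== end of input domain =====

-- B replaces A's iterative re-wrapping loop by a closed-form repetition of the
-- fixed prefix and suffix around the fields (simpler; same return value).

-- ===== PORT A =====
def pvCommentFields : String := "\n    comment_id\n    slug\n    message\n    depth\n    deleted\n    edited\n    num_replies\n    likes\n    dislikes\n    my_reaction\n    created\n    updated\n    creator { username }\n    mentions { nonce user { username } }\n"

def build_comment_fragment_py (depth : Int) : String :=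
  (PySem.List.pyRange 0 depth 1).foldl
    (fun fragment _ => "\n    " ++ pvCommentFields ++ "\n    replies {" ++ fragment ++ "\n    }")
    pvCommentFields

-- ===== PORT B =====
-- Python 's * n' (n ≤ 0 gives ""): String.join of n.toNat copies
def pvStrMul (s : String) (n : Int) : String := String.join (List.replicate n.toNat s)

def build_comment_fragment_py_alt (depth : Int) : String :=
  pvStrMul ("\n    " ++ pvCommentFields ++ "\n    replies {") depth
    ++ pvCommentFields
    ++ pvStrMul "\n    }" depth

-- ===== PRECONDITION & SPEC =====
def Spec_build_comment_fragment_py (depth : Int) (out : String) : Prop := out = build_comment_fragment_py_alt depth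
instance (depth : Int) (out : String) : Decidable (Spec_build_comment_fragment_py depth out) := by unfold Spec_build_comment_fragment_py; infer_instance

-- ===== CLAIM (what is proved, stated in full; the proofs are below) =====
def Claim_equal_build_comment_fragment_py : Prop := ∀ (depth : Int), Dom_build_comment_fragment_py depth → Spec_build_comment_fragment_py depth (build_comment_fragment_py depth)

-- ===== LEMMAS AND PROOFS =====

theorem pv_foldl_append_join (l : List String) (a : String) :
    l.foldl (· ++ ·) a = a ++ String.join l := by
  induction l generalizing a with
  | nil => simp [String.join]
  | cons x xs ih =>
    show xs.foldl (· ++ ·) (a ++ x) = a ++ String.join (x :: xs)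
    rw [ih (a ++ x)]
    show a ++ x ++ String.join xs = a ++ (x :: xs).foldl (· ++ ·) ""
    rw [List.foldl_cons, ih ("" ++ x)]
    simp [String.append_assoc]

theorem pv_join_cons (x : String) (xs : List String) :
    String.join (x :: xs) = x ++ String.join xs := by
  show (x :: xs).foldl (· ++ ·) "" = x ++ String.join xs
  rw [List.foldl_cons, pv_foldl_append_join]
  simp

-- a fold that ignores its elements is function iteration
theorem pv_foldl_const (f : String → String) (l : List Int) (s : String) :
    l.foldl (fun a _ => f a) s = f^[l.length] s := by
  induction l generalizing s with
  | nil => rfl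
  | cons x xs ih => simpa [Function.iterate_succ_apply] using ih (f s)

theorem pv_join_append (l₁ l₂ : List String) :
    String.join (l₁ ++ l₂) = String.join l₁ ++ String.join l₂ := by
  induction l₁ with
  | nil => simp [String.join]
  | cons x xs ih => rw [List.cons_append, pv_join_cons, ih, pv_join_cons, String.append_assoc]

theorem pv_iterate_wrap (P C S : String) (n : Nat) :
    (fun x => P ++ x ++ S)^[n] C
      = String.join (List.replicate n P) ++ C ++ String.join (List.replicate n S) := by
  induction n with
  | zero => simp [String.join]
  | succ n ih =>
    rw [Function.iterate_succ_apply', ih, List.replicate_succ, pv_join_cons,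
      List.replicate_succ' (n := n) (a := S), pv_join_append, pv_join_cons]
    simp [String.join, String.append_assoc]

-- ===== VERDICT (by name: the statement is the Claim_ definition above) =====
theorem build_comment_fragment_py_spec : Claim_equal_build_comment_fragment_py := by
  intro depth _
  unfold Spec_build_comment_fragment_py build_comment_fragment_py build_comment_fragment_py_alt pvStrMul
  rw [pv_foldl_const, PySem.List.length_pyRange_one]
  have h : (fun fragment => "\n    " ++ pvCommentFields ++ "\n    replies {" ++ fragment ++ "\n    }")
      = fun x => ("\n    " ++ pvCommentFields ++ "\n    replies {") ++ x ++ "\n    }" := by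
    funext x; simp [String.append_assoc]
  rw [h, pv_iterate_wrap, Int.sub_zero]
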